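-- pv_equiv track=rewrite | github.com/florianBurdairon/algo-complexite | strat1.py | get_number_covered
-- ===== SOURCE A (Python) =====
-- import math
--
-- def get_number_covered(grid: str, p: str, nb = '1'):
--     width_grid = int(math.sqrt(len(grid)))
--     nb_i = 0
--     # Count how many points has the AI
--     for i in range(len(grid)):
--         if (grid[i] == nb):
--             nb_i += 1
--     # Play the new pawns
--     m= []
--     for i in range(len(grid)):
--         m.append(grid[i])
--     for i in range(len(p)):
--         if (p[i] == nb):
--             m[i] = nb
--             if (i%width_grid != width_grid-1):
--                 m[i+1] = nb
--             if (i%width_grid != 0):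
--                 m[i-1] = nb
--             if (i>=width_grid):
--                 m[i - width_grid] = nb
--             if (i < width_grid*width_grid - width_grid):
--                 m[i + width_grid] = nb
--     # Count how many points has the AI after playing
--     new_nb_i = 0
--     for i in range(len(m)):
--         if (m[i] == nb):
--             new_nb_i += 1
--     # Return the number of points added with this pawn placement
--     return new_nb_i - nb_i
-- ===== SOURCE B (Python) =====
-- import math
--
-- def get_number_covered(grid: str, p: str, nb = '1'):
--     # Gather instead of scatter: for each grid cell, decide from p whether some
--     # pawn covers it; no grid copy, no mutation, no recount.
--     w = int(math.sqrt(len(grid)))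
--     n = len(p)
--     def pawn(i):
--         return 0 <= i < n and p[i] == nb
--     gained = 0
--     for j in range(len(grid)):
--         if grid[j] == nb:
--             continue
--         if (pawn(j)
--                 or (pawn(j - 1) and (j - 1) % w != w - 1)
--                 or (pawn(j + 1) and (j + 1) % w != 0)
--                 or pawn(j + w)
--                 or (pawn(j - w) and j < w * w)):
--             gained += 1
--     return gained
-- ===== Notes on version B (the rewrite author's own statement) =====
-- stated objective: alternative
-- what changed: B inverts the traversal (gather instead of scatter): instead of iterating over the pawns and marking each pawn's neighbourhood in a copied grid and recounting it, B makes one pass over the grid cells and decides for each cell directly from p whether some pawn covers it, counting the cells that were not already nb.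
import Mathlib
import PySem

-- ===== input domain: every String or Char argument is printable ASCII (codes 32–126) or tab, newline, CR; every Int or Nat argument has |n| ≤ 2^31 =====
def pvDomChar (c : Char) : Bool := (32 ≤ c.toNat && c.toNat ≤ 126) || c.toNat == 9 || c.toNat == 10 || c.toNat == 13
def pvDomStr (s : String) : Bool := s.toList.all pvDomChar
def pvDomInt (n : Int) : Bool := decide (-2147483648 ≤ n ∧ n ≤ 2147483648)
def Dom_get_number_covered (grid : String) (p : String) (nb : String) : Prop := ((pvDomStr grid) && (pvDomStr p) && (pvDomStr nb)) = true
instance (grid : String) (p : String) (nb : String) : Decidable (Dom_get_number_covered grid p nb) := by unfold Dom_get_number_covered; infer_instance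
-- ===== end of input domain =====

-- B inverts A's traversal (gather instead of scatter): one pass over the grid cells,
-- each cell decides from p whether a pawn covers it, instead of A's grid copy,
-- per-pawn neighbour writes and two counting passes (objective: alternative).


-- ===== PORT A =====
-- int(math.sqrt(n)) as a kernel-transparent integer square root (proved equal to
-- Nat.sqrt below); exact for every representable string length
def pvIsqrt (n : Nat) : Nat := (List.range (n + 1)).countP (fun k => k * k ≤ n) - 1

-- body of A's pawn loop: Python indexing p[i] yields a 1-char string, hence [·];
-- the list assignments m[idx] = nb are pySetD (all in range under Pre_)
def pvStepA (pL nbS : List Char) (w : Int) (m : List (List Char)) (i : Int) :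
    List (List Char) :=
  if [PySem.List.pyGetD pL i ' '] = nbS then
    let m1 := PySem.List.pySetD m i nbS
    let m2 := if PySem.Int.mod i w ≠ w - 1 then PySem.List.pySetD m1 (i + 1) nbS else m1
    let m3 := if PySem.Int.mod i w ≠ 0 then PySem.List.pySetD m2 (i - 1) nbS else m2
    let m4 := if w ≤ i then PySem.List.pySetD m3 (i - w) nbS else m3
    if i < w * w - w then PySem.List.pySetD m4 (i + w) nbS else m4
  else m

def get_number_covered (grid : String) (p : String) (nb : String) : Int :=
  -- int(math.sqrt(len(grid))): equals Nat.sqrt for every representable string length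
  let w : Int := (pvIsqrt grid.toList.length : Int)
  let nb_i : Int := (PySem.List.pyRange 0 (grid.toList.length : Int)).foldl
      (fun acc i => if [PySem.List.pyGetD grid.toList i ' '] = nb.toList then acc + 1 else acc) 0
  let m0 : List (List Char) := (PySem.List.pyRange 0 (grid.toList.length : Int)).foldl
      (fun m i => m ++ [[PySem.List.pyGetD grid.toList i ' ']]) []
  let m1 := (PySem.List.pyRange 0 (p.toList.length : Int)).foldl (pvStepA p.toList nb.toList w) m0
  let new_nb_i : Int := (PySem.List.pyRange 0 (m1.length : Int)).foldl
      (fun acc i => if PySem.List.pyGetD m1 i [] = nb.toList then acc + 1 else acc) 0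
  new_nb_i - nb_i

-- ===== PORT B =====
-- Source B's helper pawn(i): 0 <= i < n and p[i] == nb
def pvPawn (pL nbS : List Char) (i : Int) : Bool :=
  decide (0 ≤ i) && decide (i < (pL.length : Int)) &&
    decide ([PySem.List.pyGetD pL i ' '] = nbS)

def get_number_covered_alt (grid : String) (p : String) (nb : String) : Int :=
  let w : Int := (pvIsqrt grid.toList.length : Int)
  -- single pass over the grid cells; each cell asks p whether it is covered
  (PySem.List.pyRange 0 (grid.toList.length : Int)).foldl
    (fun gained j =>
      if [PySem.List.pyGetD grid.toList j ' '] = nb.toList then gained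
      else if pvPawn p.toList nb.toList j
          || (pvPawn p.toList nb.toList (j - 1) && decide (PySem.Int.mod (j - 1) w ≠ w - 1))
          || (pvPawn p.toList nb.toList (j + 1) && decide (PySem.Int.mod (j + 1) w ≠ 0))
          || pvPawn p.toList nb.toList (j + w)
          || (pvPawn p.toList nb.toList (j - w) && decide (j < w * w))
        then gained + 1 else gained) 0

-- ===== PRECONDITION & SPEC =====
-- Pre_ excludes exactly the inputs where A raises: a pawn index i with p[i] == nb that is
-- ≥ len(grid) (IndexError on m[i] = nb; for the empty grid this is also where i % width_grid
-- would raise ZeroDivisionError), or whose right-neighbour write m[i+1] falls past the end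
-- of a non-square grid (IndexError).
def Pre_get_number_covered (grid : String) (p : String) (nb : String) : Prop :=
  ∀ i < p.toList.length, [p.toList.getD i ' '] = nb.toList →
    i < grid.toList.length ∧
      (i % pvIsqrt grid.toList.length = pvIsqrt grid.toList.length - 1 ∨
        i + 1 < grid.toList.length)
instance (grid : String) (p : String) (nb : String) :
    Decidable (Pre_get_number_covered grid p nb) := by
  unfold Pre_get_number_covered; infer_instance

def pvWitness_get_number_covered : String × String × String := ("0110", "1", "1")

def Spec_get_number_covered (grid : String) (p : String) (nb : String) (out : Int) : Prop := out = get_number_covered_alt grid p nb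
instance (grid : String) (p : String) (nb : String) (out : Int) : Decidable (Spec_get_number_covered grid p nb out) := by unfold Spec_get_number_covered; infer_instance

-- ===== CLAIM (what is proved, stated in full; the proofs are below) =====
def Claim_equal_get_number_covered : Prop := ∀ (grid : String) (p : String) (nb : String), Dom_get_number_covered grid p nb → Pre_get_number_covered grid p nb → Spec_get_number_covered grid p nb (get_number_covered grid p nb)

-- ===== LEMMAS AND PROOFS =====

theorem pvCountP_range_le (N s : Nat) (h : s < N) :
    (List.range N).countP (fun k => k ≤ s) = s + 1 := by
  induction N with
  | zero => omega
  | succ N ih =>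
    by_cases hs : s = N
    · subst hs
      have hall : ∀ k ∈ List.range (s + 1), (fun k => decide (k ≤ s)) k = true := by
        intro k hk
        simp only [List.mem_range] at hk
        simp
        omega
      rw [List.countP_eq_length.2 hall, List.length_range]
    · rw [List.range_succ, List.countP_append, ih (by omega)]
      simp [decide_eq_true_eq]
      omega

theorem pvIsqrt_eq (n : Nat) : pvIsqrt n = Nat.sqrt n := by
  unfold pvIsqrt
  have h1 : (List.range (n + 1)).countP (fun k => k * k ≤ n)
      = (List.range (n + 1)).countP (fun k => k ≤ Nat.sqrt n) := by
    refine List.countP_congr ?_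
    intro k _
    simp only [decide_eq_true_eq]
    exact ⟨fun hk => (Nat.le_sqrt.2 hk), fun hk => Nat.le_sqrt.1 hk⟩
  rw [h1, pvCountP_range_le _ _ (by have := Nat.sqrt_le_self n; omega)]
  omega

-- proof-only mirror of A's pawn loop over a set of covered indices
def pvStepB (pL nbS : List Char) (w : Int) (s : PySem.Set Int) (i : Int) :
    PySem.Set Int :=
  if [PySem.List.pyGetD pL i ' '] = nbS then
    let s1 := PySem.Set.add s i
    let s2 := if PySem.Int.mod i w ≠ w - 1 then PySem.Set.add s1 (i + 1) else s1
    let s3 := if PySem.Int.mod i w ≠ 0 then PySem.Set.add s2 (i - 1) else s2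
    let s4 := if w ≤ i then PySem.Set.add s3 (i - w) else s3
    if i < w * w - w then PySem.Set.add s4 (i + w) else s4
  else s

-- the coupling between A's mutated grid copy m and the covered set s
def pvInv (gL nbS : List Char) (m : List (List Char)) (s : PySem.Set Int) : Prop :=
  m.length = gL.length ∧ s.Nodup ∧ (∀ c ∈ s, 0 ≤ c ∧ c.toNat < gL.length) ∧
    ∀ j < gL.length, m.getD j [] = (if (j : Int) ∈ s then nbS else [gL.getD j ' '])

theorem pvInv_write (gL nbS : List Char) (m : List (List Char)) (s : PySem.Set Int)
    (t : Int) (h : pvInv gL nbS m s) (h0 : 0 ≤ t) (h1 : t.toNat < gL.length) :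
    pvInv gL nbS (PySem.List.pySetD m t nbS) (PySem.Set.add s t) := by
  obtain ⟨hlen, hnd, hbd, hpt⟩ := h
  unfold pvInv
  rw [PySem.List.pySetD_of_nonneg _ _ h0]
  refine ⟨by simpa using hlen, PySem.Set.nodup_add _ _ hnd, ?_, ?_⟩
  · intro c hc
    rcases (PySem.Set.mem_add s t c).1 hc with h' | h'
    · exact hbd c h'
    · subst h'; exact ⟨h0, h1⟩
  · intro j hj
    by_cases hjt : j = t.toNat
    · subst hjt
      rw [List.getD_eq_getElem?_getD, List.getElem?_set_self (by omega), Option.getD_some]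
      rw [if_pos]
      exact (PySem.Set.mem_add s t _).2 (Or.inr (by omega))
    · rw [List.getD_eq_getElem?_getD, List.getElem?_set_ne (by omega),
        ← List.getD_eq_getElem?_getD]
      rw [hpt j hj]
      congr 1
      simp only [PySem.Set.mem_add, eq_iff_iff]
      constructor
      · exact Or.inl
      · rintro (h' | h')
        · exact h'
        · omega

-- one conditional write, performed by both loops under the same condition
theorem pvInv_cwrite (gL nbS : List Char) (m : List (List Char)) (s : PySem.Set Int)
    (c : Prop) [Decidable c] (t : Int) (h : pvInv gL nbS m s)
    (hb : c → 0 ≤ t ∧ t.toNat < gL.length) :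
    pvInv gL nbS (if c then PySem.List.pySetD m t nbS else m)
      (if c then PySem.Set.add s t else s) := by
  split_ifs with hc
  · exact pvInv_write gL nbS m s t h (hb hc).1 (hb hc).2
  · exact h

theorem pvInv_step (gL pL nbS : List Char) (i : Int)
    (m : List (List Char)) (s : PySem.Set Int)
    (h : pvInv gL nbS m s) (h0 : 0 ≤ i) (h1 : i.toNat < pL.length)
    (hpre : [pL.getD i.toNat ' '] = nbS →
      i.toNat < gL.length ∧
        (i.toNat % Nat.sqrt gL.length = Nat.sqrt gL.length - 1 ∨ i.toNat + 1 < gL.length)) :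
    pvInv gL nbS (pvStepA pL nbS (Nat.sqrt gL.length : Int) m i)
      (pvStepB pL nbS (Nat.sqrt gL.length : Int) s i) := by
  have hget : PySem.List.pyGetD pL i ' ' = pL.getD i.toNat ' ' := by
    rw [PySem.List.pyGetD_eq_getElem pL ' ' h0 (by omega), List.getD_eq_getElem?_getD,
      List.getElem?_eq_getElem h1, Option.getD_some]
  by_cases hgc : [pL.getD i.toNat ' '] = nbS
  · obtain ⟨hig, hdisj⟩ := hpre hgc
    have hw1 : 1 ≤ Nat.sqrt gL.length := by
      have := Nat.sqrt_eq_zero.not.2 (show ¬ gL.length = 0 by omega)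
      omega
    set w' := Nat.sqrt gL.length with hw
    have hmod : PySem.Int.mod i (w' : Int) = ((i.toNat % w' : Nat) : Int) := by
      conv_lhs => rw [show i = ((i.toNat : Nat) : Int) by omega]
      exact PySem.Int.mod_natCast _ _
    have hsq : w' * w' ≤ gL.length := by
      have := Nat.sqrt_le' gL.length
      simpa [pow_two, hw] using this
    simp only [pvStepA, pvStepB, hget, if_pos hgc]
    refine pvInv_cwrite gL nbS _ _ _ _ ?_ ?_
    · refine pvInv_cwrite gL nbS _ _ _ _ ?_ ?_
      · refine pvInv_cwrite gL nbS _ _ _ _ ?_ ?_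
        · refine pvInv_cwrite gL nbS _ _ _ _ ?_ ?_
          · exact pvInv_write gL nbS m s i h h0 (by omega)
          · intro hc
            have e2 : i.toNat + 1 < gL.length := by
              rcases hdisj with h' | h'
              · exact absurd (by rw [hmod, h']; push_cast [hw1]; omega) hc
              · exact h'
            omega
        · intro hc
          have e3 : 1 ≤ i.toNat :=
            Nat.one_le_iff_ne_zero.2 (fun h0' => hc (by rw [hmod, h0']; simp))
          omega
      · intro hc
        omega
    · intro hc
      have e5 : i.toNat + w' < gL.length := by
        have hq2 : ((w' : Int)) * (w' : Int) ≤ (gL.length : Int) := by exact_mod_cast hsq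
        have : (i : Int) + (w' : Int) < (gL.length : Int) := by linarith
        omega
      omega
  · simp only [pvStepA, pvStepB, hget, if_neg hgc]
    exact h

-- the invariant carried through the whole pawn loop
theorem pvInv_fold (gL pL nbS : List Char)
    (hpre : ∀ i < pL.length, [pL.getD i ' '] = nbS →
      i < gL.length ∧
        (i % Nat.sqrt gL.length = Nat.sqrt gL.length - 1 ∨ i + 1 < gL.length))
    (m0 : List (List Char)) (s0 : PySem.Set Int) (h0 : pvInv gL nbS m0 s0)
    (n : Nat) (hn : n ≤ pL.length) :
    pvInv gL nbS
      ((PySem.List.pyRange 0 (n : Int)).foldl (pvStepA pL nbS (Nat.sqrt gL.length : Int)) m0)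
      ((PySem.List.pyRange 0 (n : Int)).foldl (pvStepB pL nbS (Nat.sqrt gL.length : Int)) s0) := by
  induction n with
  | zero => simpa [PySem.List.pyRange_one_eq_nil] using h0
  | succ k ih =>
    rw [show ((k + 1 : Nat) : Int) = (k : Int) + 1 by push_cast; ring,
      PySem.List.pyRange_one_succ_right (by positivity), List.foldl_append,
      List.foldl_append, List.foldl_cons, List.foldl_cons, List.foldl_nil, List.foldl_nil]
    refine pvInv_step gL pL nbS (k : Int) _ _ (ih (by omega)) (by positivity) (by simpa using (by omega : k < pL.length)) ?_
    simpa using hpre k (by omega)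

-- helper: countP over the index range with getD = countP over the list
theorem pvCountP_range_getD {α : Type} (l : List α) (d : α) (q : α → Bool) :
    (List.range l.length).countP (fun j => q (l.getD j d)) = l.countP q := by
  induction l with
  | nil => simp
  | cons x xs ih =>
    rw [List.length_cons, List.range_succ_eq_map, List.countP_cons, List.countP_cons,
      List.countP_map]
    simp only [List.getD_cons_zero, Function.comp_def, List.getD_cons_succ, Nat.succ_eq_add_one]
    rw [ih]

-- helper: split a disjunctive count
theorem pvCountP_or {α : Type} (l : List α) (p q : α → Bool) :
    l.countP (fun x => p x || q x) = l.countP q + l.countP (fun x => p x && !q x) := by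
  induction l with
  | nil => simp
  | cons x xs ih =>
    simp only [List.countP_cons, ih]
    cases hp : p x <;> cases hq : q x <;> simp <;> omega

-- helper: counting over range those indices that lie in a nodup list
theorem pvCountP_range_mem (l : List Nat) (n : Nat) (Q : Nat → Bool)
    (hnd : l.Nodup) (hsub : ∀ x ∈ l, x < n) :
    (List.range n).countP (fun j => decide (j ∈ l) && Q j) = l.countP Q := by
  rw [List.countP_eq_length_filter, List.countP_eq_length_filter]
  refine List.Perm.length_eq ?_
  refine (List.perm_ext_iff_of_nodup ?_ ?_).2 ?_
  · exact (List.nodup_range).filter _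
  · exact hnd.filter _
  · intro a
    simp only [List.mem_filter, List.mem_range, Bool.and_eq_true, decide_eq_true_eq]
    constructor
    · rintro ⟨_, ha, hq⟩; exact ⟨ha, hq⟩
    · rintro ⟨ha, hq⟩; exact ⟨hsub a ha, ha, hq⟩

-- helper: an if-accumulating foldl is a count
theorem pvFoldl_count {α : Type} (P : α → Prop) [DecidablePred P] (l : List α) (a : Int) :
    l.foldl (fun acc x => if P x then acc + 1 else acc) a
      = a + l.countP (fun x => decide (P x)) := by
  have := PySem.List.foldl_count_if (fun x => decide (P x)) l a
  simpa using this

theorem pvInv_count (gL nbS : List Char) (m : List (List Char)) (s : PySem.Set Int)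
    (h : pvInv gL nbS m s) :
    (m.countP (fun x => x = nbS) : Int) - (gL.countP (fun c => [c] = nbS) : Int)
      = (s.countP (fun c => ¬ ([PySem.List.pyGetD gL c ' '] = nbS)) : Int) := by
  obtain ⟨hlen, hnd, hbd, hpt⟩ := h
  set G : Nat → Bool := fun j => decide ([gL.getD j ' '] = nbS) with hG
  set s' : List Nat := s.map Int.toNat with hs'
  have hmem : ∀ j : Nat, ((j : Int) ∈ s) ↔ j ∈ s' := by
    intro j
    constructor
    · intro hj; exact List.mem_map.2 ⟨_, hj, rfl⟩
    · intro hj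
      rcases List.mem_map.1 hj with ⟨c, hc, rfl⟩
      rwa [show ((c.toNat : Nat) : Int) = c from Int.toNat_of_nonneg (hbd c hc).1]
  have hnd' : s'.Nodup := by
    refine hnd.map_on ?_
    intro x hx y hy hxy
    have hx0 := (hbd x hx).1
    have hy0 := (hbd y hy).1
    omega
  have hsub : ∀ x ∈ s', x < gL.length := by
    intro x hx
    rcases List.mem_map.1 hx with ⟨c, hc, rfl⟩
    exact (hbd c hc).2
  have e1 : m.countP (fun x => x = nbS)
      = (List.range gL.length).countP (fun (j : Nat) => decide ((j : Int) ∈ s) || G j) := by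
    rw [← hlen, ← pvCountP_range_getD m [] _, hlen]
    refine List.countP_congr ?_
    intro j hj
    rw [hpt j (List.mem_range.1 hj)]
    by_cases hjs : (j : Int) ∈ s
    · simp [hjs]
    · simp [hjs, hG]
  have e2 : (List.range gL.length).countP G = gL.countP (fun c => [c] = nbS) := by
    rw [hG]; exact pvCountP_range_getD gL ' ' (fun c => decide ([c] = nbS))
  have e3 : (List.range gL.length).countP (fun (j : Nat) => decide ((j : Int) ∈ s) && !G j)
      = s.countP (fun c => ¬ ([PySem.List.pyGetD gL c ' '] = nbS)) := by
    have : (List.range gL.length).countP (fun (j : Nat) => decide ((j : Int) ∈ s) && !G j)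
        = (List.range gL.length).countP (fun j => decide (j ∈ s') && !G j) := by
      refine List.countP_congr ?_
      intro j _
      simp only [hmem j]
    rw [this, pvCountP_range_mem s' gL.length (fun j => !G j) hnd' hsub, hs', List.countP_map]
    refine List.countP_congr ?_
    intro c hc
    have h0 := (hbd c hc).1
    have h1 := (hbd c hc).2
    simp only [Function.comp, hG]
    rw [PySem.List.pyGetD_eq_getElem gL ' ' h0 (by omega)]
    rw [List.getD_eq_getElem?_getD, List.getElem?_eq_getElem h1, Option.getD_some]
    simp
  rw [e1, pvCountP_or _ _ G, e2, e3]
  push_cast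
  ring

-- ---- membership characterisation of the covered set ----

-- pawn with an explicit bound n (n = number of pawns already processed)
def pvPawnN (pL nbS : List Char) (n i : Int) : Prop :=
  0 ≤ i ∧ i < n ∧ [PySem.List.pyGetD pL i ' '] = nbS

-- closed form of "cell c is covered after the first n pawns"
def pvCovN (pL nbS : List Char) (w n c : Int) : Prop :=
  pvPawnN pL nbS n c
  ∨ (pvPawnN pL nbS n (c - 1) ∧ PySem.Int.mod (c - 1) w ≠ w - 1)
  ∨ (pvPawnN pL nbS n (c + 1) ∧ PySem.Int.mod (c + 1) w ≠ 0)
  ∨ (pvPawnN pL nbS n (c + w) ∧ w ≤ c + w)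
  ∨ (pvPawnN pL nbS n (c - w) ∧ c < w * w)

theorem pvMem_stepB (pL nbS : List Char) (w : Int) (s : PySem.Set Int) (i c : Int) :
    c ∈ pvStepB pL nbS w s i ↔ c ∈ s ∨
      ([PySem.List.pyGetD pL i ' '] = nbS ∧
        (c = i ∨ (c = i + 1 ∧ PySem.Int.mod i w ≠ w - 1)
          ∨ (c = i - 1 ∧ PySem.Int.mod i w ≠ 0)
          ∨ (c = i - w ∧ w ≤ i) ∨ (c = i + w ∧ i < w * w - w))) := by
  unfold pvStepB
  split_ifs <;> simp_all [PySem.Set.mem_add] <;>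
    (by_cases hP : c ∈ s <;> (simp only [hP, true_or, false_or]; try omega))

theorem pvPawnN_succ (pL nbS : List Char) (k : Nat) (t : Int) :
    pvPawnN pL nbS ((k : Int) + 1) t ↔
      pvPawnN pL nbS (k : Int) t ∨ (t = (k : Int) ∧ [PySem.List.pyGetD pL (k : Int) ' '] = nbS) := by
  unfold pvPawnN
  constructor
  · rintro ⟨h0, h1, h2⟩
    by_cases ht : t < (k : Int)
    · exact Or.inl ⟨h0, ht, h2⟩
    · have : t = (k : Int) := by omega
      subst this
      exact Or.inr ⟨rfl, h2⟩
  · rintro (⟨h0, h1, h2⟩ | ⟨rfl, h2⟩)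
    · exact ⟨h0, by omega, h2⟩
    · exact ⟨by positivity, by omega, h2⟩

theorem pvCovN_succ (pL nbS : List Char) (w : Int) (_hw : 0 ≤ w) (k : Nat) (c : Int) :
    pvCovN pL nbS w ((k : Int) + 1) c ↔
      pvCovN pL nbS w (k : Int) c ∨
        ([PySem.List.pyGetD pL (k : Int) ' '] = nbS ∧
          (c = (k : Int) ∨ (c = (k : Int) + 1 ∧ PySem.Int.mod (k : Int) w ≠ w - 1)
            ∨ (c = (k : Int) - 1 ∧ PySem.Int.mod (k : Int) w ≠ 0)
            ∨ (c = (k : Int) - w ∧ w ≤ (k : Int))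
            ∨ (c = (k : Int) + w ∧ (k : Int) < w * w - w))) := by
  unfold pvCovN
  rw [pvPawnN_succ, pvPawnN_succ, pvPawnN_succ, pvPawnN_succ, pvPawnN_succ]
  constructor
  · rintro ((h | ⟨he, hq⟩) | ⟨(h | ⟨he, hq⟩), hm⟩ | ⟨(h | ⟨he, hq⟩), hm⟩ |
      ⟨(h | ⟨he, hq⟩), hm⟩ | ⟨(h | ⟨he, hq⟩), hm⟩)
    · exact Or.inl (Or.inl h)
    · exact Or.inr ⟨hq, Or.inl (by omega)⟩
    · exact Or.inl (Or.inr (Or.inl ⟨h, hm⟩))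
    · refine Or.inr ⟨hq, Or.inr (Or.inl ⟨by omega, ?_⟩)⟩
      rwa [show (k : Int) = c - 1 by omega]
    · exact Or.inl (Or.inr (Or.inr (Or.inl ⟨h, hm⟩)))
    · refine Or.inr ⟨hq, Or.inr (Or.inr (Or.inl ⟨by omega, ?_⟩))⟩
      rwa [show (k : Int) = c + 1 by omega]
    · exact Or.inl (Or.inr (Or.inr (Or.inr (Or.inl ⟨h, hm⟩))))
    · exact Or.inr ⟨hq, Or.inr (Or.inr (Or.inr (Or.inl ⟨by omega, by omega⟩)))⟩
    · exact Or.inl (Or.inr (Or.inr (Or.inr (Or.inr ⟨h, hm⟩))))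
    · exact Or.inr ⟨hq, Or.inr (Or.inr (Or.inr (Or.inr ⟨by omega, by omega⟩)))⟩
  · rintro ((h | ⟨h, hm⟩ | ⟨h, hm⟩ | ⟨h, hm⟩ | ⟨h, hm⟩) |
      ⟨hq, (he | ⟨he, hm⟩ | ⟨he, hm⟩ | ⟨he, hm⟩ | ⟨he, hm⟩)⟩)
    · exact Or.inl (Or.inl h)
    · exact Or.inr (Or.inl ⟨Or.inl h, hm⟩)
    · exact Or.inr (Or.inr (Or.inl ⟨Or.inl h, hm⟩))
    · exact Or.inr (Or.inr (Or.inr (Or.inl ⟨Or.inl h, hm⟩)))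
    · exact Or.inr (Or.inr (Or.inr (Or.inr ⟨Or.inl h, hm⟩)))
    · exact Or.inl (Or.inr ⟨he, hq⟩)
    · refine Or.inr (Or.inl ⟨Or.inr ⟨by omega, hq⟩, ?_⟩)
      rwa [show c - 1 = (k : Int) by omega]
    · refine Or.inr (Or.inr (Or.inl ⟨Or.inr ⟨by omega, hq⟩, ?_⟩))
      rwa [show c + 1 = (k : Int) by omega]
    · exact Or.inr (Or.inr (Or.inr (Or.inl ⟨Or.inr ⟨by omega, hq⟩, by omega⟩)))
    · exact Or.inr (Or.inr (Or.inr (Or.inr ⟨Or.inr ⟨by omega, hq⟩, by omega⟩)))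

theorem pvMem_fold (pL nbS : List Char) (w : Int) (hw : 0 ≤ w) (n : Nat) (c : Int) :
    (c ∈ (PySem.List.pyRange 0 (n : Int)).foldl (pvStepB pL nbS w) PySem.Set.empty) ↔
      pvCovN pL nbS w (n : Int) c := by
  induction n with
  | zero =>
    simp [PySem.List.pyRange_one_eq_nil, PySem.Set.empty, pvCovN, pvPawnN]
    omega
  | succ k ih =>
    rw [show ((k + 1 : Nat) : Int) = (k : Int) + 1 by push_cast; ring,
      PySem.List.pyRange_one_succ_right (by positivity), List.foldl_append,
      List.foldl_cons, List.foldl_nil, pvMem_stepB, ih, pvCovN_succ pL nbS w hw k c]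

-- pointwise: the covered predicate B evaluates per cell is exactly pvCovN at n = len p
theorem pvCond_iff (pL nbS : List Char) (w j : Int) (_hw : 0 ≤ w) (hj : 0 ≤ j) :
    (pvPawn pL nbS j
        || (pvPawn pL nbS (j - 1) && decide (PySem.Int.mod (j - 1) w ≠ w - 1))
        || (pvPawn pL nbS (j + 1) && decide (PySem.Int.mod (j + 1) w ≠ 0))
        || pvPawn pL nbS (j + w)
        || (pvPawn pL nbS (j - w) && decide (j < w * w))) = true ↔
      pvCovN pL nbS w (pL.length : Int) j := by
  unfold pvPawn pvCovN pvPawnN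
  simp only [Bool.or_eq_true, Bool.and_eq_true, decide_eq_true_eq]
  constructor
  · rintro ((((⟨⟨h0, h1⟩, h2⟩ | ⟨⟨⟨h0, h1⟩, h2⟩, hm⟩) | ⟨⟨⟨h0, h1⟩, h2⟩, hm⟩) |
      ⟨⟨h0, h1⟩, h2⟩) | ⟨⟨⟨h0, h1⟩, h2⟩, hm⟩)
    · exact Or.inl ⟨h0, h1, h2⟩
    · exact Or.inr (Or.inl ⟨⟨h0, h1, h2⟩, hm⟩)
    · exact Or.inr (Or.inr (Or.inl ⟨⟨h0, h1, h2⟩, hm⟩))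
    · exact Or.inr (Or.inr (Or.inr (Or.inl ⟨⟨h0, h1, h2⟩, by omega⟩)))
    · exact Or.inr (Or.inr (Or.inr (Or.inr ⟨⟨h0, h1, h2⟩, hm⟩)))
  · rintro (⟨h0, h1, h2⟩ | ⟨⟨h0, h1, h2⟩, hm⟩ | ⟨⟨h0, h1, h2⟩, hm⟩ |
      ⟨⟨h0, h1, h2⟩, hm⟩ | ⟨⟨h0, h1, h2⟩, hm⟩)
    · exact Or.inl (Or.inl (Or.inl (Or.inl ⟨⟨h0, h1⟩, h2⟩)))
    · exact Or.inl (Or.inl (Or.inl (Or.inr ⟨⟨⟨h0, h1⟩, h2⟩, hm⟩)))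
    · exact Or.inl (Or.inl (Or.inr ⟨⟨⟨h0, h1⟩, h2⟩, hm⟩))
    · exact Or.inl (Or.inr ⟨⟨h0, h1⟩, h2⟩)
    · exact Or.inr ⟨⟨⟨h0, h1⟩, h2⟩, hm⟩

-- ===== VERDICT (by name: the statement is the Claim_ definition above) =====
theorem get_number_covered_spec : Claim_equal_get_number_covered := by
  intro grid p nb _ hpre
  unfold Pre_get_number_covered at hpre
  unfold Spec_get_number_covered get_number_covered get_number_covered_alt
  simp only []
  generalize grid.toList = gL at *
  generalize p.toList = pL at *
  generalize nb.toList = nbS at *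
  simp only [pvIsqrt_eq] at *
  set w : Int := (Nat.sqrt gL.length : Int) with hwdef
  have hw : 0 ≤ w := by positivity
  have hm0 : List.foldl (fun m i => m ++ [[PySem.List.pyGetD gL i ' ']]) []
      (PySem.List.pyRange 0 (gL.length : Int)) = gL.map (fun c => [c]) := by
    rw [PySem.List.foldl_pyRange_zero_pyGetD' gL ' ' (fun m x => m ++ [[x]]) []]
    simpa using PySem.List.foldl_append_singleton_eq_map (fun c => [c]) gL []
  rw [hm0]
  set m1 := List.foldl (pvStepA pL nbS w) (gL.map fun c => [c])
    (PySem.List.pyRange 0 (pL.length : Int)) with hm1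
  set cov := List.foldl (pvStepB pL nbS w) PySem.Set.empty
    (PySem.List.pyRange 0 (pL.length : Int)) with hcov
  have hinv0 : pvInv gL nbS (gL.map fun c => [c]) PySem.Set.empty := by
    refine ⟨by simp, List.nodup_nil, by simp [PySem.Set.empty], ?_⟩
    intro j hj
    rw [if_neg (by simp [PySem.Set.empty])]
    rw [List.getD_eq_getElem?_getD, List.getElem?_map, List.getElem?_eq_getElem hj,
      List.getD_eq_getElem?_getD, List.getElem?_eq_getElem hj]
    simp
  have hinv : pvInv gL nbS m1 cov := by
    rw [hm1, hcov]
    exact pvInv_fold gL pL nbS hpre _ _ hinv0 pL.length le_rfl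
  have hnd := hinv.2.1
  have hbd := hinv.2.2.1
  -- A's value = count over the covered set
  have hA : (PySem.List.pyRange 0 (m1.length : Int)).foldl
        (fun acc i => if PySem.List.pyGetD m1 i [] = nbS then acc + 1 else acc) 0
      - (PySem.List.pyRange 0 (gL.length : Int)).foldl
        (fun acc i => if [PySem.List.pyGetD gL i ' '] = nbS then acc + 1 else acc) 0
      = (cov.countP (fun c => ¬ ([PySem.List.pyGetD gL c ' '] = nbS)) : Int) := by
    rw [PySem.List.foldl_pyRange_zero_pyGetD' m1 []
        (fun acc x => if x = nbS then acc + 1 else acc) 0,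
      PySem.List.foldl_pyRange_zero_pyGetD' gL ' '
        (fun acc x => if [x] = nbS then acc + 1 else acc) 0,
      pvFoldl_count (fun x => x = nbS) m1 0,
      pvFoldl_count (fun x => [x] = nbS) gL 0]
    have := pvInv_count gL nbS m1 cov hinv
    simpa using this
  rw [hA]
  -- B's value = the same count
  have hbody : ∀ (acc : Int) (j : Int),
      (if [PySem.List.pyGetD gL j ' '] = nbS then acc
        else if pvPawn pL nbS j
            || (pvPawn pL nbS (j - 1) && decide (PySem.Int.mod (j - 1) w ≠ w - 1))
            || (pvPawn pL nbS (j + 1) && decide (PySem.Int.mod (j + 1) w ≠ 0))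
            || pvPawn pL nbS (j + w)
            || (pvPawn pL nbS (j - w) && decide (j < w * w))
          then acc + 1 else acc)
      = (if (¬ ([PySem.List.pyGetD gL j ' '] = nbS)) ∧
            (pvPawn pL nbS j
              || (pvPawn pL nbS (j - 1) && decide (PySem.Int.mod (j - 1) w ≠ w - 1))
              || (pvPawn pL nbS (j + 1) && decide (PySem.Int.mod (j + 1) w ≠ 0))
              || pvPawn pL nbS (j + w)
              || (pvPawn pL nbS (j - w) && decide (j < w * w))) = true
          then acc + 1 else acc) := by
    intro acc j
    split_ifs <;> tauto
  have hfun : (fun (gained : Int) (j : Int) =>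
      if [PySem.List.pyGetD gL j ' '] = nbS then gained
      else if pvPawn pL nbS j
          || (pvPawn pL nbS (j - 1) && decide (PySem.Int.mod (j - 1) w ≠ w - 1))
          || (pvPawn pL nbS (j + 1) && decide (PySem.Int.mod (j + 1) w ≠ 0))
          || pvPawn pL nbS (j + w)
          || (pvPawn pL nbS (j - w) && decide (j < w * w))
        then gained + 1 else gained)
      = (fun (gained : Int) (j : Int) =>
        if (¬ ([PySem.List.pyGetD gL j ' '] = nbS)) ∧
            (pvPawn pL nbS j
              || (pvPawn pL nbS (j - 1) && decide (PySem.Int.mod (j - 1) w ≠ w - 1))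
              || (pvPawn pL nbS (j + 1) && decide (PySem.Int.mod (j + 1) w ≠ 0))
              || pvPawn pL nbS (j + w)
              || (pvPawn pL nbS (j - w) && decide (j < w * w))) = true
          then gained + 1 else gained) := by
    funext acc j
    exact hbody acc j
  rw [hfun, PySem.List.pyRange_one]
  simp only [sub_zero, Int.toNat_natCast, zero_add, List.foldl_map]
  rw [pvFoldl_count _ (List.range gL.length) 0]
  have hcount : (List.range gL.length).countP
        (fun (k : Nat) => decide ((¬ ([PySem.List.pyGetD gL (k : Int) ' '] = nbS)) ∧
          (pvPawn pL nbS (k : Int)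
            || (pvPawn pL nbS ((k : Int) - 1) && decide (PySem.Int.mod ((k : Int) - 1) w ≠ w - 1))
            || (pvPawn pL nbS ((k : Int) + 1) && decide (PySem.Int.mod ((k : Int) + 1) w ≠ 0))
            || pvPawn pL nbS ((k : Int) + w)
            || (pvPawn pL nbS ((k : Int) - w) && decide ((k : Int) < w * w))) = true))
      = cov.countP (fun c => ¬ ([PySem.List.pyGetD gL c ' '] = nbS)) := by
    have hstep : (List.range gL.length).countP
          (fun (k : Nat) => decide ((k : Int) ∈ cov) &&
            decide (¬ ([PySem.List.pyGetD gL (k : Int) ' '] = nbS)))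
        = cov.countP (fun c => ¬ ([PySem.List.pyGetD gL c ' '] = nbS)) := by
      set s' : List Nat := cov.map Int.toNat with hs'
      have hmem : ∀ j : Nat, ((j : Int) ∈ cov) ↔ j ∈ s' := by
        intro j
        constructor
        · intro hj; exact List.mem_map.2 ⟨_, hj, rfl⟩
        · intro hj
          rcases List.mem_map.1 hj with ⟨c, hc, rfl⟩
          rwa [show ((c.toNat : Nat) : Int) = c from Int.toNat_of_nonneg (hbd c hc).1]
      have hnd' : s'.Nodup := by
        refine hnd.map_on ?_
        intro x hx y hy hxy
        have hx0 := (hbd x hx).1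
        have hy0 := (hbd y hy).1
        omega
      have hsub : ∀ x ∈ s', x < gL.length := by
        intro x hx
        rcases List.mem_map.1 hx with ⟨c, hc, rfl⟩
        exact (hbd c hc).2
      have h1 : (List.range gL.length).countP
            (fun (k : Nat) => decide ((k : Int) ∈ cov) &&
              decide (¬ ([PySem.List.pyGetD gL (k : Int) ' '] = nbS)))
          = (List.range gL.length).countP
            (fun (k : Nat) => decide (k ∈ s') &&
              decide (¬ ([PySem.List.pyGetD gL (k : Int) ' '] = nbS))) := by
        refine List.countP_congr ?_
        intro k _
        simp only [hmem k]
      rw [h1, pvCountP_range_mem s' gL.length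
          (fun k => decide (¬ ([PySem.List.pyGetD gL (k : Int) ' '] = nbS))) hnd' hsub,
        hs', List.countP_map]
      refine List.countP_congr ?_
      intro c hc
      simp only [Function.comp]
      rw [show ((c.toNat : Nat) : Int) = c from Int.toNat_of_nonneg (hbd c hc).1]
    rw [← hstep]
    refine List.countP_congr ?_
    intro k hk
    have hk' : (k : Nat) < gL.length := List.mem_range.1 hk
    have hmemcov : ((k : Int) ∈ cov) ↔ pvCovN pL nbS w (pL.length : Int) (k : Int) := by
      rw [hcov]; exact pvMem_fold pL nbS w hw pL.length (k : Int)
    have hcnd := pvCond_iff pL nbS w (k : Int) hw (by positivity)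
    simp only [Bool.and_eq_true, decide_eq_true_eq]
    constructor
    · rintro ⟨hg, hc⟩
      exact ⟨hmemcov.2 (hcnd.1 hc), hg⟩
    · rintro ⟨hm, hg⟩
      exact ⟨hg, hcnd.2 (hmemcov.1 hm)⟩
  rw [hcount]
  ring
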